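-- pv_equiv track=rewrite | github.com/Algorithm-Study/Algorithm | implementation/P77885_이성우.py | solution
-- ===== SOURCE A (Python) =====
-- def solution(numbers):
--     answer = []
--
--     for num in numbers:
--         bin_num = '0' + bin(num)[2:]
--         idx = bin_num.rfind('0')
--         bin_num = list(bin_num)
--
--         if num % 2 == 0:
--             bin_num[-1] = '1'
--
--         else:
--             bin_num[idx], bin_num[idx+1] = bin_num[idx+1], bin_num[idx]
--
--         answer.append(int(''.join(bin_num), 2))
--     return answer
-- ===== SOURCE B (Python) =====
-- def solution(numbers):
--     result = []
--     for num in numbers: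
--         if num % 2 == 0:
--             result.append(num + 1)
--         else:
--             t, m = 0, num
--             while m % 2 == 1:
--                 m //= 2
--                 t += 1
--             result.append(num + (1 << (t - 1)))
--     return result
-- ===== Notes on version B (the rewrite author's own statement) =====
-- stated objective: alternative
-- what changed: Replaces A's binary-string construction, rfind and character-swap with pure integer arithmetic: even num maps to num+1, odd num adds half its lowest zero bit found by counting trailing one bits.
-- outside the precondition, e.g. on solution([-3]): A raises ValueError, B returns [-2]; on solution([-4]): A returns [5], B returns [-3]
import Mathlib
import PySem

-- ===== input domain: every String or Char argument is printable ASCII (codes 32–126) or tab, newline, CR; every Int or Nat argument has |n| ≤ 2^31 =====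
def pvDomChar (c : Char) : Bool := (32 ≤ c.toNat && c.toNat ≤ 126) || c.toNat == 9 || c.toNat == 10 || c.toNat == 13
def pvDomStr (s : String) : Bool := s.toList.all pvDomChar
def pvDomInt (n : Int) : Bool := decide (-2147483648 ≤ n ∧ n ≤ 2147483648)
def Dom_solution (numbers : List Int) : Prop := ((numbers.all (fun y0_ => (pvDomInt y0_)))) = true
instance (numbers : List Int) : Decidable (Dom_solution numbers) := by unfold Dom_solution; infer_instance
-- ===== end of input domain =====

-- B replaces A's binary-string build / rfind / character swap with pure integer
-- arithmetic (count trailing one bits); equivalence is proved on non-negative inputs.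

-- ===== PORT A =====
-- bin(n)[2:] for n ≥ 0 (Pre_ excludes negatives, where Python's bin gives a '-…' string)
def binDigitsN (n : Nat) : List Char :=
  if _h : n < 2 then [if n = 1 then '1' else '0']
  else binDigitsN (n / 2) ++ [if n % 2 = 1 then '1' else '0']
decreasing_by omega

-- hand port of str.rfind('0') (index of last '0', -1 if absent); exact on List Char
def rfind0 : List Char → Int
  | [] => -1
  | c :: cs =>
    let r := rfind0 cs
    if r ≥ 0 then r + 1 else if c = '0' then 0 else -1

-- int(''.join(chars), 2) for '0'/'1' chars
def parse2 (xs : List Char) : Nat :=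
  xs.foldl (fun a c => 2 * a + (if c = '1' then 1 else 0)) 0

-- the simultaneous swap bin_num[idx], bin_num[idx+1] = bin_num[idx+1], bin_num[idx]
def swapAdj (xs : List Char) (i : Nat) : List Char :=
  (xs.set i (xs.getD (i + 1) ' ')).set (i + 1) (xs.getD i ' ')

def solution (numbers : List Int) : List Int :=
  numbers.foldl (fun answer num =>
    let bin_num := '0' :: binDigitsN num.toNat  -- '0' + bin(num)[2:]; exact for num ≥ 0
    let idx := rfind0 bin_num                   -- ≥ 0 here since bin_num starts with '0'
    let bin_num2 :=
      if PySem.Int.mod num 2 = 0 then bin_num.set (bin_num.length - 1) '1'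
      else swapAdj bin_num idx.toNat
    answer ++ [(parse2 bin_num2 : Int)]) []

-- ===== PORT B =====
-- B's while loop counting trailing one bits; the Nat argument is a fuel guard
-- making the loop total (64 suffices for every |num| ≤ 2^31 admitted by Dom)
def trailOnes : Nat → Int → Nat
  | 0, _ => 0
  | f + 1, m => if PySem.Int.mod m 2 = 1 then trailOnes f (PySem.Int.floordiv m 2) + 1 else 0

def solution_alt (numbers : List Int) : List Int :=
  numbers.foldl (fun result num =>
    if PySem.Int.mod num 2 = 0 then result ++ [num + 1]
    else result ++ [num + 2 ^ (trailOnes 64 num - 1)]) []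

-- ===== PRECONDITION & SPEC =====
-- Pre_ excludes lists containing a negative number: on an odd negative A raises
-- ValueError (int() rejects the 'b…' string left after slicing off the sign), and on an
-- even negative A's value |num|+1 is an accident of int() accepting the stray '0b' prefix.
def Pre_solution (numbers : List Int) : Prop := ∀ n ∈ numbers, 0 ≤ n
instance (numbers : List Int) : Decidable (Pre_solution numbers) := by
  unfold Pre_solution; infer_instance

def pvWitness_solution : List Int := [0, 1, 6, 13, 2147483647]

def Spec_solution (numbers : List Int) (out : List Int) : Prop := out = solution_alt numbers
instance (numbers : List Int) (out : List Int) : Decidable (Spec_solution numbers out) := by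
  unfold Spec_solution; infer_instance

-- ===== CLAIM (what is proved, stated in full; the proofs are below) =====
def Claim_equal_solution : Prop :=
  ∀ (numbers : List Int), Dom_solution numbers → Pre_solution numbers →
    Spec_solution numbers (solution numbers)

-- ===== LEMMAS AND PROOFS =====

-- number of trailing one bits, as a plain Nat recursion
def natT (n : Nat) : Nat :=
  if n % 2 = 1 then natT (n / 2) + 1 else 0
decreasing_by omega

theorem natT_even {n : Nat} (h : n % 2 = 0) : natT n = 0 := by
  rw [natT]; simp [h]

theorem natT_odd {n : Nat} (h : n % 2 = 1) : natT n = natT (n / 2) + 1 := by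
  rw [natT]; simp [h]

theorem parse2_foldl (xs : List Char) (a : Nat) :
    xs.foldl (fun a c => 2 * a + (if c = '1' then 1 else 0)) a
      = a * 2 ^ xs.length + parse2 xs := by
  induction xs generalizing a with
  | nil => simp [parse2]
  | cons c cs ih =>
    simp only [List.foldl_cons, List.length_cons, parse2]
    rw [ih, ih (2 * 0 + _)]
    ring

theorem parse2_append (xs ys : List Char) :
    parse2 (xs ++ ys) = parse2 xs * 2 ^ ys.length + parse2 ys := by
  unfold parse2
  rw [List.foldl_append, parse2_foldl]
  rfl

theorem parse2_cons0 (xs : List Char) : parse2 ('0' :: xs) = parse2 xs := by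
  simp [parse2]

theorem parse2_bin (n : Nat) : parse2 (binDigitsN n) = n := by
  induction n using Nat.strong_induction_on with
  | _ n ih =>
    rw [binDigitsN]
    by_cases h : n < 2
    · interval_cases n <;> simp [parse2]
    · simp only [h, dite_false]
      rw [parse2_append, ih (n / 2) (by omega)]
      by_cases h2 : n % 2 = 1 <;> simp [parse2, h2] <;> try omega

theorem binDigitsN_last (n : Nat) :
    ∃ Q, binDigitsN n = Q ++ [if n % 2 = 1 then '1' else '0'] := by
  rw [binDigitsN]
  by_cases h : n < 2
  · interval_cases n
    · exact ⟨[], by simp⟩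
    · exact ⟨[], by simp⟩
  · exact ⟨binDigitsN (n / 2), by simp [h]⟩

theorem rfind0_append_one (xs : List Char) : rfind0 (xs ++ ['1']) = rfind0 xs := by
  induction xs with
  | nil => decide
  | cons c cs ih => simp only [List.cons_append, rfind0, ih]

theorem rfind0_append_zero (xs : List Char) : rfind0 (xs ++ ['0']) = (xs.length : Int) := by
  induction xs with
  | nil => simp [rfind0]
  | cons c cs ih => simp [rfind0, ih]

theorem rfind0_append_ones (xs : List Char) (t : Nat) :
    rfind0 (xs ++ List.replicate t '1') = rfind0 xs := by
  induction t with
  | zero => simp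
  | succ t ih =>
    rw [List.replicate_succ', ← List.append_assoc, rfind0_append_one, ih]

theorem swapAdj_mid (Q ys : List Char) (a b : Char) :
    swapAdj (Q ++ a :: b :: ys) Q.length = Q ++ b :: a :: ys := by
  induction Q with
  | nil => simp [swapAdj]
  | cons c cs ih =>
    simp only [List.cons_append, List.length_cons, swapAdj] at ih ⊢
    simp only [List.getD_cons_succ, List.set_cons_succ]
    rw [ih]

theorem set_last (xs : List Char) (a b : Char) :
    (xs ++ [a]).set xs.length b = xs ++ [b] := by
  induction xs with
  | nil => simp
  | cons c cs ih => simp [ih]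

-- structure of '0' + bin(n) for odd n: some prefix, a '0', then natT n trailing ones
theorem struct_odd (n : Nat) (h : n % 2 = 1) :
    ∃ Q, '0' :: binDigitsN n = Q ++ '0' :: List.replicate (natT n) '1' := by
  induction n using Nat.strong_induction_on with
  | _ n ih =>
    by_cases h1 : n = 1
    · subst h1
      refine ⟨[], ?_⟩
      rw [binDigitsN, natT, natT]
      norm_num
    · have hge : 2 ≤ n := by omega
      have hbin : binDigitsN n = binDigitsN (n / 2) ++ ['1'] := by
        rw [binDigitsN]; simp [Nat.not_lt.mpr hge, h]
      by_cases h2 : n / 2 % 2 = 1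
      · obtain ⟨Q, hQ⟩ := ih (n / 2) (by omega) h2
        refine ⟨Q, ?_⟩
        rw [hbin, natT_odd h, ← List.cons_append, hQ, List.replicate_succ',
          List.append_assoc]
        simp
      · obtain ⟨Q, hQ⟩ := binDigitsN_last (n / 2)
        simp only [if_neg h2] at hQ
        refine ⟨'0' :: Q, ?_⟩
        rw [hbin, hQ, natT_odd h, natT_even (by omega)]
        simp [List.replicate_succ]

theorem natT_pos {n : Nat} (h : n % 2 = 1) : 1 ≤ natT n := by
  rw [natT_odd h]; omega

theorem trailOnes_natCast (f n : Nat) (hn : n < 2 ^ f) :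
    trailOnes f (n : Int) = natT n := by
  induction f generalizing n with
  | zero => interval_cases n; simp [trailOnes, natT_even]
  | succ f ih =>
    rw [trailOnes]
    by_cases h : n % 2 = 1
    · have hm : PySem.Int.mod (n : Int) 2 = ((n % 2 : Nat) : Int) :=
        PySem.Int.mod_natCast n 2
      have hd : PySem.Int.floordiv (n : Int) 2 = ((n / 2 : Nat) : Int) :=
        PySem.Int.floordiv_natCast n 2
      rw [hm, hd, h, ih (n / 2) (by rw [pow_succ] at hn; omega)]
      simp [natT_odd h]
    · have hm : PySem.Int.mod (n : Int) 2 = ((n % 2 : Nat) : Int) :=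
        PySem.Int.mod_natCast n 2
      rw [hm]
      have : n % 2 = 0 := by omega
      rw [this, natT_even this]
      norm_num

theorem parse2_replicate_one (t : Nat) : parse2 (List.replicate t '1') = 2 ^ t - 1 := by
  induction t with
  | zero => simp [parse2]
  | succ t ih =>
    rw [List.replicate_succ', parse2_append, ih]
    have : 1 ≤ 2 ^ t := Nat.one_le_two_pow
    simp [parse2, pow_succ]
    omega

-- the per-element equality: A's string transform = B's arithmetic on a non-negative n
theorem step_eq (n : Nat) :
    (parse2 (if PySem.Int.mod (n : Int) 2 = 0
        then ('0' :: binDigitsN n).set (('0' :: binDigitsN n).length - 1) '1'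
        else swapAdj ('0' :: binDigitsN n) (rfind0 ('0' :: binDigitsN n)).toNat) : Nat)
      = if n % 2 = 0 then n + 1 else n + 2 ^ (natT n - 1) := by
  have hm : PySem.Int.mod (n : Int) 2 = ((n % 2 : Nat) : Int) := PySem.Int.mod_natCast n 2
  by_cases h : n % 2 = 0
  · rw [if_pos (by rw [hm, h]; rfl), if_pos h]
    obtain ⟨Q, hQ⟩ := binDigitsN_last n
    rw [if_neg (by omega)] at hQ
    have hp : parse2 ('0' :: binDigitsN n) = n := by rw [parse2_cons0, parse2_bin]
    rw [hQ] at hp ⊢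
    rw [← List.cons_append] at hp ⊢
    have hl : (('0' :: Q) ++ ['0']).length - 1 = ('0' :: Q).length := by simp
    rw [hl, set_last]
    rw [parse2_append] at hp
    rw [parse2_append]
    simp [parse2] at hp ⊢
    omega
  · have ho : n % 2 = 1 := by omega
    rw [if_neg (by rw [hm, ho]; norm_num), if_neg h]
    obtain ⟨Q, hQ⟩ := struct_odd n ho
    have ht := natT_pos ho
    set t := natT n with htdef
    have hrep : List.replicate t '1' = '1' :: List.replicate (t - 1) '1' := by
      rw [← List.replicate_succ]
      congr 1
      omega
    have hfind : rfind0 ('0' :: binDigitsN n) = (Q.length : Int) := by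
      rw [hQ, ← List.singleton_append, ← List.append_assoc, rfind0_append_ones,
        rfind0_append_zero]
    have hp : parse2 ('0' :: binDigitsN n) = n := by rw [parse2_cons0, parse2_bin]
    rw [hQ, hrep] at hp
    rw [hfind, hQ, hrep]
    have : ((Q.length : Int)).toNat = Q.length := by simp
    rw [this, swapAdj_mid]
    rw [parse2_append] at hp ⊢
    have h1 : parse2 ('0' :: '1' :: List.replicate (t - 1) '1')
        = 2 ^ t - 1 := by
      rw [← hrep, parse2_cons0, parse2_replicate_one]
    have h2 : parse2 ('1' :: '0' :: List.replicate (t - 1) '1')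
        = 2 ^ t + 2 ^ (t - 1) - 1 := by
      have : ('1' :: '0' :: List.replicate (t - 1) '1')
          = ['1', '0'] ++ List.replicate (t - 1) '1' := by simp
      rw [this, parse2_append, parse2_replicate_one]
      have h3 : parse2 ['1', '0'] = 2 := by simp [parse2]
      rw [h3]
      have e1 : 2 ^ t = 2 * 2 ^ (t - 1) := by
        conv_lhs => rw [show t = (t - 1) + 1 by omega]
        rw [pow_succ]; ring
      have : 1 ≤ 2 ^ (t - 1) := Nat.one_le_two_pow
      simp only [List.length_replicate]
      omega
    rw [h1] at hp
    rw [h2]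
    have hlen1 : ('0' :: '1' :: List.replicate (t - 1) '1').length = t + 1 := by
      simp; omega
    have hlen2 : ('1' :: '0' :: List.replicate (t - 1) '1').length = t + 1 := by
      simp; omega
    rw [hlen1] at hp
    rw [hlen2]
    have e1 : 2 ^ t = 2 * 2 ^ (t - 1) := by
      conv_lhs => rw [show t = (t - 1) + 1 by omega]
      rw [pow_succ]; ring
    have : 1 ≤ 2 ^ (t - 1) := Nat.one_le_two_pow
    omega

theorem fold_eq (numbers : List Int) (hd : Dom_solution numbers)
    (hp : Pre_solution numbers) (acc : List Int) :
    numbers.foldl (fun answer num =>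
      let bin_num := '0' :: binDigitsN num.toNat
      let idx := rfind0 bin_num
      let bin_num2 :=
        if PySem.Int.mod num 2 = 0 then bin_num.set (bin_num.length - 1) '1'
        else swapAdj bin_num idx.toNat
      answer ++ [(parse2 bin_num2 : Int)]) acc
    = numbers.foldl (fun result num =>
      if PySem.Int.mod num 2 = 0 then result ++ [num + 1]
      else result ++ [num + 2 ^ (trailOnes 64 num - 1)]) acc := by
  induction numbers generalizing acc with
  | nil => rfl
  | cons num rest ih =>
    have hnum : 0 ≤ num := hp num (by simp)
    have hdc := hd
    unfold Dom_solution at hdc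
    simp only [List.all_cons, Bool.and_eq_true] at hdc
    have hbound : num ≤ 2147483648 := by
      have h1 := hdc.1
      simp [pvDomInt] at h1
      exact h1.2
    obtain ⟨n, rfl⟩ := Int.eq_ofNat_of_zero_le hnum
    have hn64 : n < 2 ^ 64 := by
      have : (n : Int) ≤ 2147483648 := hbound
      have : n ≤ 2147483648 := by exact_mod_cast this
      omega
    have hstep := step_eq n
    have htn : (n : Int).toNat = n := by simp
    simp only [List.foldl_cons]
    rw [ih (by unfold Dom_solution; exact hdc.2) (fun m hm => hp m (by simp [hm]))]
    congr 1
    have hm : PySem.Int.mod (n : Int) 2 = ((n % 2 : Nat) : Int) := PySem.Int.mod_natCast n 2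
    by_cases h : n % 2 = 0
    · have hc : PySem.Int.mod ((n : Int)) 2 = 0 := by rw [hm, h]; rfl
      rw [if_pos hc, if_pos h] at hstep
      simp only [if_pos hc, htn, hstep]
      push_cast
      ring_nf
    · have ho : n % 2 = 1 := by omega
      have hc : ¬ PySem.Int.mod ((n : Int)) 2 = 0 := by rw [hm, ho]; norm_num
      rw [if_neg hc, if_neg h] at hstep
      simp only [if_neg hc, htn, hstep, trailOnes_natCast 64 n hn64]
      push_cast
      ring_nf

-- ===== VERDICT (by name: the statement is the Claim_ definition above) =====
theorem solution_spec : Claim_equal_solution := by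
  intro numbers hd hp
  unfold Spec_solution solution solution_alt
  exact fold_eq numbers hd hp []
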